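-- pv_equiv track=rewrite | github.com/dbcjason/NCAAWCards | player_cards_pipeline/scripts/batch_transfer_projection.py | select_shard_rows
-- ===== SOURCE A (Python) =====
-- from typing import Any
--
-- def select_shard_rows(
--     rows: list[tuple[Any, dict[str, str]]],
--     chunk_count: int,
--     chunk_index: int,
-- ) -> list[tuple[Any, dict[str, str]]]:
--     if chunk_count <= 1:
--         return rows
--     if chunk_index < 0 or chunk_index >= chunk_count:
--         raise ValueError(f"chunk-index {chunk_index} out of range for chunk-count {chunk_count}")
--     return [row for idx, row in enumerate(rows) if idx % chunk_count == chunk_index]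
-- ===== SOURCE B (Python) =====
-- def select_shard_rows(rows, chunk_count, chunk_index):
--     if chunk_count <= 1:
--         return rows
--     if chunk_index < 0 or chunk_index >= chunk_count:
--         raise ValueError(f"chunk-index {chunk_index} out of range for chunk-count {chunk_count}")
--     return rows[chunk_index::chunk_count]
-- ===== Notes on version B (the rewrite author's own statement) =====
-- stated objective: idiomatic
-- what changed: Replaces the enumerate-plus-modulo-filter comprehension that scans and tests every row with a direct stride slice rows[chunk_index::chunk_count] that steps straight to the selected rows.
import Mathlib
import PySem

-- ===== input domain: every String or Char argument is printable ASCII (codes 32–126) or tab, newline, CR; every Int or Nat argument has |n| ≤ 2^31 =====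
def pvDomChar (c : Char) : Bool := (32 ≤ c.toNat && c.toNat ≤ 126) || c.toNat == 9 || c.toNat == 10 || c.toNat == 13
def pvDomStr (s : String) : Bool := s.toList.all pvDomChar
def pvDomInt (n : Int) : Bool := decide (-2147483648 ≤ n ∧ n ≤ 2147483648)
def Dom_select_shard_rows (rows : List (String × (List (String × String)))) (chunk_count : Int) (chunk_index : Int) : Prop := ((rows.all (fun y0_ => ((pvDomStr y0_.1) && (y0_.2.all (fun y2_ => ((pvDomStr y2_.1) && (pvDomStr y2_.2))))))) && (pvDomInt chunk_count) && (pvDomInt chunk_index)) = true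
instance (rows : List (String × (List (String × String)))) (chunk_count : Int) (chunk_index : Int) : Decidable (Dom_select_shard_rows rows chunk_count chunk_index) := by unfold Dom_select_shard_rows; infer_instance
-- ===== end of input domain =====

-- B replaces A's enumerate-plus-modulo filter over every row with a stride slice
-- rows[chunk_index::chunk_count] (idiomatic; identical return value on Pre_).

-- ===== PORT A =====
-- [row for idx, row in enumerate(rows) if idx % chunk_count == chunk_index]
def select_shard_rows (rows : List (String × (List (String × String)))) (chunk_count : Int) (chunk_index : Int) : List (String × (List (String × String))) :=
  if chunk_count ≤ 1 then rows
  else if chunk_index < 0 ∨ chunk_index ≥ chunk_count then []  -- Python raises ValueError here; excluded by Pre_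
  else ((PySem.List.enumerate rows 0).filter
          (fun p => PySem.Int.mod p.1 chunk_count == chunk_index)).map (·.2)

-- ===== PORT B =====
-- hand port of the slice xs[start::step]: exact for 0 ≤ start and step > 0,
-- which the guards guarantee on the branch where it is used
def strideEvery {α : Type} (xs : List α) (step : Nat) : List α :=
  match xs with
  | [] => []
  | x :: rest => x :: strideEvery (rest.drop (step - 1)) step
termination_by xs.length
decreasing_by simp only [List.length_drop, List.length_cons]; omega

def select_shard_rows_alt (rows : List (String × (List (String × String)))) (chunk_count : Int) (chunk_index : Int) : List (String × (List (String × String))) :=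
  if chunk_count ≤ 1 then rows
  else if chunk_index < 0 ∨ chunk_index ≥ chunk_count then []  -- Python raises ValueError here; excluded by Pre_
  else strideEvery (rows.drop chunk_index.toNat) chunk_count.toNat

-- ===== PRECONDITION & SPEC =====
-- Pre_ excludes exactly the inputs on which A raises ValueError (chunk_index out of range with chunk_count > 1).
def Pre_select_shard_rows (rows : List (String × (List (String × String)))) (chunk_count : Int) (chunk_index : Int) : Prop :=
  chunk_count ≤ 1 ∨ (0 ≤ chunk_index ∧ chunk_index < chunk_count)
instance (rows : List (String × (List (String × String)))) (chunk_count : Int) (chunk_index : Int) : Decidable (Pre_select_shard_rows rows chunk_count chunk_index) := by unfold Pre_select_shard_rows; infer_instance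

def pvWitness_select_shard_rows : (List (String × (List (String × String)))) × Int × Int :=
  ([("a", [("x", "1")]), ("b", []), ("c", []), ("d", [])], 2, 1)

def Spec_select_shard_rows (rows : List (String × (List (String × String)))) (chunk_count : Int) (chunk_index : Int) (out : List (String × (List (String × String)))) : Prop := out = select_shard_rows_alt rows chunk_count chunk_index
instance (rows : List (String × (List (String × String)))) (chunk_count : Int) (chunk_index : Int) (out : List (String × (List (String × String)))) : Decidable (Spec_select_shard_rows rows chunk_count chunk_index out) := by unfold Spec_select_shard_rows; infer_instance

-- ===== CLAIM (what is proved, stated in full; the proofs are below) =====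
def Claim_equal_select_shard_rows : Prop := ∀ (rows : List (String × (List (String × String)))) (chunk_count : Int) (chunk_index : Int), Dom_select_shard_rows rows chunk_count chunk_index → Pre_select_shard_rows rows chunk_count chunk_index → Spec_select_shard_rows rows chunk_count chunk_index (select_shard_rows rows chunk_count chunk_index)

-- ===== LEMMAS AND PROOFS =====

-- phase-counting reformulation of A's filter, used only in the proof
def selWithPhase {α : Type} (c : Nat) (xs : List α) (r : Nat) : List α :=
  match xs with
  | [] => []
  | x :: rest =>
      (if r = 0 then [x] else []) ++ selWithPhase c rest (if r = 0 then c - 1 else r - 1)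

lemma selWithPhase_eq_stride {α : Type} (c : Nat) (hc : 0 < c) :
    ∀ (xs : List α) (r : Nat), r < c →
      selWithPhase c xs r = strideEvery (xs.drop r) c := by
  intro xs
  induction xs with
  | nil => intro r _; rw [List.drop_nil, selWithPhase, strideEvery]
  | cons x rest ih =>
      intro r hr
      by_cases h0 : r = 0
      · subst h0
        rw [selWithPhase, if_pos rfl, if_pos rfl, ih (c - 1) (by omega)]
        rw [List.drop_zero, strideEvery]
        simp
      · obtain ⟨r', rfl⟩ : ∃ r', r = r' + 1 := ⟨r - 1, by omega⟩
        rw [selWithPhase, if_neg h0, if_neg h0]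
        simp only [List.nil_append, Nat.add_sub_cancel, List.drop_succ_cons]
        exact ih r' (by omega)

lemma filter_enum_eq_phase {α : Type} (c i : Nat) (hc : 0 < c) (hi : i < c) :
    ∀ (xs : List α) (q rr : Nat), rr < c →
      ((PySem.List.enumerate xs ((q * c + rr : Nat) : Int)).filter
          (fun p => PySem.Int.mod p.1 (c : Int) == (i : Int))).map (·.2)
      = selWithPhase c xs (if rr ≤ i then i - rr else i + c - rr) := by
  intro xs
  induction xs with
  | nil => intro q rr _; simp [PySem.List.enumerate_nil, selWithPhase]
  | cons x rest ih =>
      intro q rr hrr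
      rw [PySem.List.enumerate_cons]
      have hmod : PySem.Int.mod ((q * c + rr : Nat) : Int) (c : Int) = ((rr : Nat) : Int) := by
        rw [PySem.Int.mod_natCast]
        congr 1
        rw [Nat.add_comm, Nat.add_mul_mod_self_right, Nat.mod_eq_of_lt hrr]
      have hnextN : q * c + rr + 1 = (if rr + 1 = c then (q + 1) * c else q * c + (rr + 1)) := by
        split_ifs with h
        · rw [Nat.succ_mul]; omega
        · omega
      have hnext : ((q * c + rr : Nat) : Int) + 1
          = (((if rr + 1 = c then (q + 1) * c else q * c + (rr + 1)) : Nat) : Int) := by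
        rw [← hnextN]; push_cast; ring
      rw [hnext, selWithPhase]
      by_cases hre : rr = i
      · subst hre
        have hpos : (PySem.Int.mod ((((q * c + rr : Nat) : Int)), x).1 (c : Int) == ((rr : Nat) : Int)) = true := by
          show (PySem.Int.mod ((q * c + rr : Nat) : Int) (c : Int) == ((rr : Nat) : Int)) = true
          rw [hmod]; simp
        rw [List.filter_cons, if_pos hpos, List.map_cons]
        have hR : (if rr ≤ rr then rr - rr else rr + c - rr) = 0 := by simp
        rw [hR, if_pos rfl, if_pos rfl]
        by_cases hlast : rr + 1 = c
        · rw [if_pos hlast]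
          have h1 : ((q + 1) * c : Nat) = (q + 1) * c + 0 := by omega
          rw [h1, ih (q + 1) 0 hc]
          have h2 : (if (0 : Nat) ≤ rr then rr - 0 else rr + c - 0) = c - 1 := by
            rw [if_pos (Nat.zero_le _)]; omega
          rw [h2]; rfl
        · rw [if_neg hlast, ih q (rr + 1) (by omega)]
          have h2 : (if rr + 1 ≤ rr then rr - (rr + 1) else rr + c - (rr + 1)) = c - 1 := by
            rw [if_neg (by omega)]; omega
          rw [h2]; rfl
      · have hneg : ¬ (PySem.Int.mod ((((q * c + rr : Nat) : Int)), x).1 (c : Int) == ((i : Nat) : Int)) = true := by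
          show ¬ (PySem.Int.mod ((q * c + rr : Nat) : Int) (c : Int) == ((i : Nat) : Int)) = true
          rw [hmod]; simp [hre]
        rw [List.filter_cons, if_neg hneg]
        have hR : (if rr ≤ i then i - rr else i + c - rr) ≠ 0 := by
          split_ifs <;> omega
        rw [if_neg hR, if_neg hR, List.nil_append]
        by_cases hlast : rr + 1 = c
        · rw [if_pos hlast]
          have h1 : ((q + 1) * c : Nat) = (q + 1) * c + 0 := by omega
          rw [h1, ih (q + 1) 0 hc]
          congr 1
          split_ifs <;> omega
        · rw [if_neg hlast, ih q (rr + 1) (by omega)]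
          congr 1
          split_ifs <;> omega

-- ===== VERDICT (by name: the statement is the Claim_ definition above) =====
theorem select_shard_rows_spec : Claim_equal_select_shard_rows := by
  intro rows c i _ hpre
  unfold Spec_select_shard_rows select_shard_rows select_shard_rows_alt
  by_cases h1 : c ≤ 1
  · simp [h1]
  · rw [if_neg h1, if_neg h1]
    have hi : 0 ≤ i ∧ i < c := by
      rcases hpre with h | h
      · omega
      · exact h
    rw [if_neg (by omega), if_neg (by omega)]
    have hc2 : (1 : Int) < c := by omega
    have hcN : c = ((c.toNat : Nat) : Int) := by omega
    have hiN : i = ((i.toNat : Nat) : Int) := by omega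
    have hiltc : i.toNat < c.toNat := by omega
    have hcpos : 0 < c.toNat := by omega
    calc ((PySem.List.enumerate rows 0).filter
            (fun p => PySem.Int.mod p.1 c == i)).map (·.2)
        = ((PySem.List.enumerate rows ((0 * c.toNat + 0 : Nat) : Int)).filter
            (fun p => PySem.Int.mod p.1 ((c.toNat : Nat) : Int) == ((i.toNat : Nat) : Int))).map (·.2) := by
          rw [← hcN, ← hiN]; norm_num
      _ = selWithPhase c.toNat rows (if 0 ≤ i.toNat then i.toNat - 0 else i.toNat + c.toNat - 0) :=
          filter_enum_eq_phase c.toNat i.toNat hcpos hiltc rows 0 0 hcpos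
      _ = selWithPhase c.toNat rows i.toNat := by simp
      _ = strideEvery (rows.drop i.toNat) c.toNat :=
          selWithPhase_eq_stride c.toNat hcpos rows i.toNat hiltc
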